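-- pv_equiv track=rewrite | github.com/Mvamsi2000/mcp_ai-v2 | catalog_writer.py | _canonical_fields
-- ===== SOURCE A (Python) =====
-- from typing import Dict, Any, List, Optional
--
-- def _canonical_fields(row: Dict[str, Any]) -> List[str]:
--     """
--     Produce a stable, readable CSV header. We prioritize common fields
--     and then include any extras (sorted) to avoid dropping information.
--     """
--     preferred = [
--         "run_id", "path", "filename", "ext",
--         "extraction_status", "skipped_reason",
--         "category", "domain", "tags",
--         "contains_pii", "confidence",
--         "summary", "pii", "glossary_terms",
--         "ai_cost_usd", "sha1", "engine", "pages", "language",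
--     ]
--     keys = list(row.keys())
--     # keep preferred order, then append any others
--     out: List[str] = [k for k in preferred if k in keys]
--     for k in sorted(keys):
--         if k not in out:
--             out.append(k)
--     return out
-- ===== SOURCE B (Python) =====
-- from typing import Dict, Any, List
--
--
-- def _canonical_fields(row: Dict[str, Any]) -> List[str]:
--     """
--     Stable CSV header: preferred fields first (in their fixed order),
--     then any remaining fields alphabetically.  Done as a single keyed
--     sort over the row's keys with a composite sort key.
--     """
--     preferred = [
--         "run_id", "path", "filename", "ext",
--         "extraction_status", "skipped_reason",
--         "category", "domain", "tags",
--         "contains_pii", "confidence",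
--         "summary", "pii", "glossary_terms",
--         "ai_cost_usd", "sha1", "engine", "pages", "language",
--     ]
--     pos = {name: i for i, name in enumerate(preferred)}
--     n = len(preferred)
--     return sorted(row.keys(), key=lambda k: (pos[k], "") if k in pos else (n, k))
-- ===== Notes on version B (the rewrite author's own statement) =====
-- stated objective: simpler
-- what changed: Replaces the two-stage build (membership-filtered preferred list, then a second loop appending non-members of the sorted keys) with one keyed sort over all keys using a composite key (preferred index, '') / (len(preferred), name).
import Mathlib
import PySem

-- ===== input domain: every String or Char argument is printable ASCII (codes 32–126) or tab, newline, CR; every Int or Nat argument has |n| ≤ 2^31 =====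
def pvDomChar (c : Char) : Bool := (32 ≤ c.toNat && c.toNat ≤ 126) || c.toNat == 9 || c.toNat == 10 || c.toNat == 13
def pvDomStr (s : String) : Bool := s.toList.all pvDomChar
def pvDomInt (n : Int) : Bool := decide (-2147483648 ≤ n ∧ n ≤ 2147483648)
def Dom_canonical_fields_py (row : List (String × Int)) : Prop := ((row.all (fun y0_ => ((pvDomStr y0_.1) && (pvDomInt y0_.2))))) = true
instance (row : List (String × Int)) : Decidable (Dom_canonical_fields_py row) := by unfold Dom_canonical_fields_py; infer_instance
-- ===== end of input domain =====

-- B replaces A's two-stage build with one keyed sort over the keys (objective: simpler).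

-- shared constant: the preferred header order (same literal in both Pythons)
def pvPreferredFields : List String :=
  ["run_id", "path", "filename", "ext",
   "extraction_status", "skipped_reason",
   "category", "domain", "tags",
   "contains_pii", "confidence",
   "summary", "pii", "glossary_terms",
   "ai_cost_usd", "sha1", "engine", "pages", "language"]

-- ===== PORT A =====
def canonical_fields_py (row : List (String × Int)) : List String :=
  let preferred := pvPreferredFields
  let keys := PySem.List.dedup (row.map Prod.fst)
  let out := preferred.filter (fun k => keys.contains k)
  (PySem.List.sorted keys (fun k => k)).foldl
    (fun out k => if out.contains k then out else out ++ [k]) out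

-- ===== PORT B =====
-- pos = {name: i for i, name in enumerate(preferred)}
def pvPosDict : PySem.Dict String Int :=
  (PySem.List.enumerate pvPreferredFields).foldl
    (fun d p => d.insert p.2 p.1) PySem.Dict.empty

-- sorted(row.keys(), key=lambda k: (pos[k], "") if k in pos else (n, k))
def canonical_fields_py_alt (row : List (String × Int)) : List String :=
  let pos := pvPosDict
  let n : Int := (pvPreferredFields.length : Int)
  PySem.List.sorted2 (PySem.List.dedup (row.map Prod.fst))
    (fun k => if pos.contains k then pos.getD k 0 else n)
    (fun k => if pos.contains k then "" else k)

-- ===== PRECONDITION & SPEC =====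
def Spec_canonical_fields_py (row : List (String × Int)) (out : List String) : Prop := out = canonical_fields_py_alt row
instance (row : List (String × Int)) (out : List String) : Decidable (Spec_canonical_fields_py row out) := by unfold Spec_canonical_fields_py; infer_instance

-- ===== CLAIM (what is proved, stated in full; the proofs are below) =====
def Claim_equal_canonical_fields_py : Prop := ∀ (row : List (String × Int)), Dom_canonical_fields_py row → Spec_canonical_fields_py row (canonical_fields_py row)

-- ===== LEMMAS AND PROOFS =====

-- the composite sort key as one Lex value
def pvKey (k : String) : Lex (Int × String) :=
  toLex (if pvPosDict.contains k then pvPosDict.getD k 0 else (pvPreferredFields.length : Int),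
         if pvPosDict.contains k then "" else k)

-- sorted2 with component keys is sorted with the Lex key
theorem pv_sorted2_eq_sorted_lex {α : Type} (xs : List α) (k1 : α → Int) (k2 : α → String) :
    PySem.List.sorted2 xs k1 k2 = PySem.List.sorted xs (fun x => toLex (k1 x, k2 x)) := by
  unfold PySem.List.sorted2 PySem.List.sorted
  show List.foldl (fun acc x => PySem.List.insertBy
      (fun a b => decide (k1 a < k1 b) || (!decide (k1 b < k1 a) && decide (k2 a < k2 b))) x acc) [] xs
    = List.foldl (fun acc x => PySem.List.insertBy
      (fun a b => decide (toLex (k1 a, k2 a) < toLex (k1 b, k2 b))) x acc) [] xs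
  have hb : (fun (a b : α) => decide (k1 a < k1 b) || (!decide (k1 b < k1 a) && decide (k2 a < k2 b)))
      = (fun a b => decide (toLex (k1 a, k2 a) < toLex (k1 b, k2 b))) := by
    funext a b
    simp only [Prod.Lex.toLex_lt_toLex]
    by_cases h1 : k1 a < k1 b <;> by_cases h2 : k1 b < k1 a <;> by_cases h3 : k2 a < k2 b <;>
      simp [h1, h2, h3] <;> omega
  rw [hb]

-- A's second loop: appending unseen keys of a Nodup list is append-filter
theorem pv_loop_eq (l : List String) (hl : l.Nodup) (a : List String) :
    l.foldl (fun out k => if out.contains k then out else out ++ [k]) a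
      = a ++ l.filter (fun k => !a.contains k) := by
  induction l generalizing a with
  | nil => simp
  | cons k t ih =>
    have hk : k ∉ t := (List.nodup_cons.mp hl).1
    have ht : t.Nodup := (List.nodup_cons.mp hl).2
    by_cases h : a.contains k
    · simp only [List.foldl_cons, List.filter_cons, h]
      simpa using ih ht a
    · simp only [List.foldl_cons, List.filter_cons, h, Bool.false_eq_true, Bool.not_false,
        if_false, if_true]
      rw [ih ht (a ++ [k])]
      have : t.filter (fun x => !(a ++ [k]).contains x) = t.filter (fun x => !a.contains x) := by
        apply List.filter_congr
        intro x hx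
        have hxk : x ≠ k := fun e => hk (e ▸ hx)
        simp [hxk]
      rw [this]
      simp

theorem pv_pref_nodup : pvPreferredFields.Nodup := by decide

theorem pv_contains_iff (k : String) : pvPosDict.contains k = true ↔ k ∈ pvPreferredFields := by
  rw [PySem.Dict.contains_iff_mem_keys]
  have : pvPosDict.keys = pvPreferredFields := by decide
  rw [this]

theorem pv_key_pref {k : String} (h : k ∈ pvPreferredFields) :
    pvKey k = toLex (pvPosDict.getD k 0, "") := by
  have hc : pvPosDict.contains k = true := (pv_contains_iff k).mpr h
  simp [pvKey, hc]

theorem pv_key_extra {k : String} (h : k ∉ pvPreferredFields) :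
    pvKey k = toLex ((pvPreferredFields.length : Int), k) := by
  have hc : pvPosDict.contains k = false := by
    by_contra hcc
    exact h ((pv_contains_iff k).mp (by simpa using hcc))
  simp [pvKey, hc]

theorem pv_getD_lt : ∀ k ∈ pvPreferredFields, pvPosDict.getD k 0 < (pvPreferredFields.length : Int) := by decide

theorem pv_pref_pairwise : pvPreferredFields.Pairwise (fun a b => pvKey a < pvKey b) := by decide

-- preferred key < extra key
theorem pv_key_pref_lt_extra {a b : String} (ha : a ∈ pvPreferredFields) (hb : b ∉ pvPreferredFields) :
    pvKey a < pvKey b := by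
  rw [pv_key_pref ha, pv_key_extra hb]
  exact Prod.Lex.toLex_lt_toLex.mpr (Or.inl (pv_getD_lt a ha))

-- ===== VERDICT (by name: the statement is the Claim_ definition above) =====
theorem canonical_fields_py_spec : Claim_equal_canonical_fields_py := by
  intro row _
  unfold Spec_canonical_fields_py canonical_fields_py canonical_fields_py_alt
  rw [pv_sorted2_eq_sorted_lex]
  set keys := PySem.List.dedup (row.map Prod.fst) with hkeysdef
  have hkeys : keys.Nodup := PySem.List.nodup_dedup _
  set S := PySem.List.sorted keys (fun k => k) with hSdef
  have hSperm : S.Perm keys := PySem.List.sorted_perm _ _ _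
  have hSnd : S.Nodup := hSperm.nodup_iff.mpr hkeys
  set O0 := pvPreferredFields.filter (fun k => keys.contains k) with hO0def
  rw [pv_loop_eq S hSnd O0]
  -- rewrite the filter predicate: membership in O0 ↔ membership in preferred for keys of S
  have hfilt : S.filter (fun k => !O0.contains k) = S.filter (fun k => !pvPreferredFields.contains k) := by
    apply List.filter_congr
    intro x hx
    have hxk : x ∈ keys := hSperm.mem_iff.mp hx
    by_cases hp : x ∈ pvPreferredFields
    · have h1 : O0.contains x = true := by
        refine List.contains_iff_mem.mpr ?_
        exact List.mem_filter.mpr ⟨hp, List.contains_iff_mem.mpr hxk⟩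
      have h2 : pvPreferredFields.contains x = true := List.contains_iff_mem.mpr hp
      rw [h1, h2]
    · have h1 : O0.contains x = false := by
        rw [Bool.eq_false_iff]
        intro hc
        exact hp (List.mem_filter.mp (List.contains_iff_mem.mp hc)).1
      have h2 : pvPreferredFields.contains x = false := by
        rw [Bool.eq_false_iff]
        intro hc
        exact hp (List.contains_iff_mem.mp hc)
      rw [h1, h2]
  rw [hfilt]
  set E := S.filter (fun k => !pvPreferredFields.contains k) with hEdef
  -- apply the characterization of sorted
  symm
  apply PySem.List.sorted_eq_of_perm_of_pairwise_lt keys (O0 ++ E)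
      (fun k => toLex (if pvPosDict.contains k then pvPosDict.getD k 0 else (pvPreferredFields.length : Int),
                       if pvPosDict.contains k then "" else k))
  · -- permutation
    have h1 : O0.Perm (keys.filter (fun k => pvPreferredFields.contains k)) := by
      rw [List.perm_ext_iff_of_nodup (List.Nodup.filter _ pv_pref_nodup) (List.Nodup.filter _ hkeys)]
      intro a
      simp only [List.mem_filter]
      constructor
      · rintro ⟨hp, hk⟩; exact ⟨by simpa using hk, by simpa using hp⟩
      · rintro ⟨hk, hp⟩; exact ⟨by simpa using hp, by simpa using hk⟩
    have h2 : E.Perm (keys.filter (fun k => !pvPreferredFields.contains k)) := hSperm.filter _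
    exact (h1.append h2).trans (List.filter_append_perm _ keys)
  · -- pairwise strict key order
    have hO0pw : O0.Pairwise (fun a b => pvKey a < pvKey b) :=
      pv_pref_pairwise.sublist List.filter_sublist
    have hEpw : E.Pairwise (fun a b => pvKey a < pvKey b) := by
      have hle : S.Pairwise (fun a b : String => a ≤ b) :=
        PySem.List.sorted_pairwise keys (fun k => k)
      have hlt : S.Pairwise (fun a b : String => a < b) :=
        (hle.and hSnd).imp (fun h => lt_of_le_of_ne h.1 h.2)
      have hElt : E.Pairwise (fun a b : String => a < b) := hlt.sublist List.filter_sublist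
      refine hElt.imp_of_mem ?_
      intro a b ha hb hab
      have hna : a ∉ pvPreferredFields := by
        have := (List.mem_filter.mp (hEdef ▸ ha)).2; simpa using this
      have hnb : b ∉ pvPreferredFields := by
        have := (List.mem_filter.mp (hEdef ▸ hb)).2; simpa using this
      rw [pv_key_extra hna, pv_key_extra hnb]
      exact Prod.Lex.toLex_lt_toLex.mpr (Or.inr ⟨rfl, hab⟩)
    have hcross : ∀ a ∈ O0, ∀ b ∈ E, pvKey a < pvKey b := by
      intro a ha b hb
      have hpa : a ∈ pvPreferredFields := (List.mem_filter.mp (hO0def ▸ ha)).1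
      have hnb : b ∉ pvPreferredFields := by
        have := (List.mem_filter.mp (hEdef ▸ hb)).2; simpa using this
      exact pv_key_pref_lt_extra hpa hnb
    have : (O0 ++ E).Pairwise (fun a b => pvKey a < pvKey b) :=
      List.pairwise_append.mpr ⟨hO0pw, hEpw, hcross⟩
    exact this.imp (fun h => by simpa [pvKey] using h)
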